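-- pv_equiv track=rewrite | github.com/pypi-data/pypi-mirror-400 | packages/koder/koder-0.4.11.tar.gz/koder-0.4.11/koder_agent/core/scheduler.py | _get_display_input
-- ===== SOURCE A (Python) =====
-- def _get_display_input(user_input: str) -> str:
--     """Get a filtered version of user input for display purposes."""
--     # Check if input contains AGENTS.md content
--     if "AGENTS.md content:" in user_input:
--         lines = user_input.split("\n")
--         filtered_lines = []
--         skip_koder_content = False
--
--         for line in lines:
--             if "AGENTS.md content:" in line:
--                 skip_koder_content = True
--                 continue
--             elif skip_koder_content and line.startswith("User request:"):
--                 skip_koder_content = False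
--                 filtered_lines.append(line)
--             elif not skip_koder_content:
--                 filtered_lines.append(line)
--
--         return "\n".join(filtered_lines)
--
--     return user_input
-- ===== SOURCE B (Python) =====
-- def _get_display_input(user_input: str) -> str:
--     """Get a filtered version of user input for display purposes."""
--     if "AGENTS.md content:" not in user_input:
--         return user_input
--     lines = user_input.split("\n")
--     out = []
--     i = 0
--     n = len(lines)
--     while i < n:
--         line = lines[i]
--         i += 1
--         if "AGENTS.md content:" not in line:
--             out.append(line)
--             continue
--         # marker hit: inner scan drops lines until a terminator line
--         while i < n:
--             ln = lines[i]
--             i += 1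
--             if "AGENTS.md content:" in ln:
--                 continue  # a fresh marker keeps us dropping
--             if ln.startswith("User request:"):
--                 out.append(ln)
--                 break
--     return "\n".join(out)
-- ===== Notes on version B (the rewrite author's own statement) =====
-- stated objective: alternative
-- what changed: Replaced the boolean skip-flag state machine with an index-driven outer loop plus a nested inner scan that drops lines after a marker until the terminator line.
import Mathlib
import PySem

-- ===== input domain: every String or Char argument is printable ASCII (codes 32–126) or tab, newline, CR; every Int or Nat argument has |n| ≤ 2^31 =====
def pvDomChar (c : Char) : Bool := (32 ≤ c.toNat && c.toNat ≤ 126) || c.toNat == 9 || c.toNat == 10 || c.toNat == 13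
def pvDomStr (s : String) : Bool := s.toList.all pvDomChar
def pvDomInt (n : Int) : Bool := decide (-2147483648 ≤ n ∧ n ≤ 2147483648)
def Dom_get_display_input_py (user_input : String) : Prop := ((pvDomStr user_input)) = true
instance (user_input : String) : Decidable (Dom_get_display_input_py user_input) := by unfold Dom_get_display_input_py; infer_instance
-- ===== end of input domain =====

-- B replaces A's boolean skip-flag state machine with an outer loop plus a nested inner
-- scan that drops lines until the terminator; same cost, a different decomposition.

def pvMarker : List Char := "AGENTS.md content:".toList
def pvTerm : List Char := "User request:".toList

-- ===== PORT A =====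
-- one step of A's for-loop over state (filtered_lines, skip_koder_content)
def pvAStep (st : List (List Char) × Bool) (line : List Char) : List (List Char) × Bool :=
  if PySem.Chars.isIn pvMarker line then (st.1, true)
  else if st.2 && PySem.Chars.startswith line pvTerm then (st.1 ++ [line], false)
  else if !st.2 then (st.1 ++ [line], st.2)
  else st

def get_display_input_py (user_input : String) : String :=
  if PySem.Chars.isIn pvMarker user_input.toList then
    let lines := PySem.Chars.splitOn user_input.toList "\n".toList
    let fin := lines.foldl pvAStep ([], false)
    String.ofList (PySem.Chars.join "\n".toList fin.1)
  else user_input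

-- ===== PORT B =====
mutual
-- B's outer while-loop: append lines until a marker line is seen
def pvBOuter (out : List (List Char)) : List (List Char) → List (List Char)
  | [] => out
  | line :: rest =>
    if PySem.Chars.isIn pvMarker line then pvBInner out rest
    else pvBOuter (out ++ [line]) rest
-- B's inner scan: drop lines until a 'User request:' terminator line
def pvBInner (out : List (List Char)) : List (List Char) → List (List Char)
  | [] => out
  | ln :: rest =>
    if PySem.Chars.isIn pvMarker ln then pvBInner out rest
    else if PySem.Chars.startswith ln pvTerm then pvBOuter (out ++ [ln]) rest
    else pvBInner out rest
end

def get_display_input_py_alt (user_input : String) : String :=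
  if PySem.Chars.isIn pvMarker user_input.toList then
    String.ofList (PySem.Chars.join "\n".toList
      (pvBOuter [] (PySem.Chars.splitOn user_input.toList "\n".toList)))
  else user_input

-- ===== PRECONDITION & SPEC =====
def Spec_get_display_input_py (user_input : String) (out : String) : Prop := out = get_display_input_py_alt user_input
instance (user_input : String) (out : String) : Decidable (Spec_get_display_input_py user_input out) := by unfold Spec_get_display_input_py; infer_instance

-- ===== CLAIM (what is proved, stated in full; the proofs are below) =====
def Claim_equal_get_display_input_py : Prop := ∀ (user_input : String), Dom_get_display_input_py user_input → Spec_get_display_input_py user_input (get_display_input_py user_input)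

-- ===== LEMMAS AND PROOFS =====
-- A's fold from skip=false computes B's outer loop, and from skip=true B's inner scan.
theorem pvFold_eq (lines : List (List Char)) : ∀ acc : List (List Char),
    (lines.foldl pvAStep (acc, false)).1 = pvBOuter acc lines
    ∧ (lines.foldl pvAStep (acc, true)).1 = pvBInner acc lines := by
  induction lines with
  | nil => intro acc; exact ⟨rfl, rfl⟩
  | cons line rest ih =>
    intro acc
    constructor
    · show (rest.foldl pvAStep (pvAStep (acc, false) line)).1 = _
      by_cases h : PySem.Chars.isIn pvMarker line = true
      · rw [pvBOuter, if_pos h]; simp only [pvAStep, if_pos h]; exact (ih acc).2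
      · rw [pvBOuter, if_neg h]
        simp only [pvAStep, if_neg h, Bool.false_and, Bool.not_false, if_true]
        exact (ih (acc ++ [line])).1
    · show (rest.foldl pvAStep (pvAStep (acc, true) line)).1 = _
      by_cases h : PySem.Chars.isIn pvMarker line = true
      · rw [pvBInner, if_pos h]; simp only [pvAStep, if_pos h]; exact (ih acc).2
      · rw [pvBInner, if_neg h]
        by_cases h2 : PySem.Chars.startswith line pvTerm = true
        · rw [if_pos h2]
          simp only [pvAStep, if_neg h, h2, Bool.true_and, if_true]
          exact (ih (acc ++ [line])).1
        · rw [if_neg h2]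
          simp only [pvAStep, if_neg h, Bool.true_and, h2, Bool.not_true, if_false,
            Bool.false_eq_true]
          exact (ih acc).2

-- ===== VERDICT (by name: the statement is the Claim_ definition above) =====
theorem get_display_input_py_spec : Claim_equal_get_display_input_py := by
  intro s _
  unfold Spec_get_display_input_py get_display_input_py get_display_input_py_alt
  by_cases h : PySem.Chars.isIn pvMarker s.toList = true
  · rw [if_pos h, if_pos h]
    exact congrArg (fun l => String.ofList (PySem.Chars.join "\n".toList l)) ((pvFold_eq _ []).1)
  · rw [if_neg h, if_neg h]
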